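-- pv_equiv track=rewrite | github.com/lemurey/advent_of_code | 2020/day16.py | _make_template
-- ===== SOURCE A (Python) =====
-- def _make_template(my_ticket, reverses, randoms):
--     overall_length = 127
--     template = '.' + '-' * overall_length + '.' + '\n'
--     for i, v in enumerate(my_ticket):
--         if i % 4 == 0:
--             if i == 0:
--                 template += f'|{" " * overall_length}|\n|'
--             else:
--                 template += f'|\n|{" " * overall_length}|\n|'
--         if v in reverses:
--             key = reverses[v]
--         else:
--             key = randoms[i]
--
--         template += f'\t{key: >18}: {v}\t'
--     template += f'|\n|{" " * overall_length}|\n'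
--     template += "'" + '-' * overall_length + "'"
--     return template
-- ===== SOURCE B (Python) =====
-- def _make_template(my_ticket, reverses, randoms):
--     W = 127
--     spacer = '|' + ' ' * W + '|\n'
--     cells = [f'\t{(reverses[v] if v in reverses else randoms[i]): >18}: {v}\t'
--              for i, v in enumerate(my_ticket)]
--
--     def rows(cs):
--         if len(cs) <= 4:
--             return ''.join(cs)
--         return ''.join(cs[:4]) + '|\n' + spacer + '|' + rows(cs[4:])
--
--     head = '' if not cells else spacer + '|' + rows(cells)
--     return '.' + '-' * W + '.\n' + head + '|\n' + spacer + "'" + '-' * W + "'"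
-- ===== Notes on version B (the rewrite author's own statement) =====
-- stated objective: alternative
-- what changed: A interleaves border/spacer rows inside one modular-counter loop that += appends to a growing string; B first builds the flat list of formatted cell strings, then chunks it into groups of four joined by the row separator, and assembles header, body and footer in one expression.
import Mathlib
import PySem

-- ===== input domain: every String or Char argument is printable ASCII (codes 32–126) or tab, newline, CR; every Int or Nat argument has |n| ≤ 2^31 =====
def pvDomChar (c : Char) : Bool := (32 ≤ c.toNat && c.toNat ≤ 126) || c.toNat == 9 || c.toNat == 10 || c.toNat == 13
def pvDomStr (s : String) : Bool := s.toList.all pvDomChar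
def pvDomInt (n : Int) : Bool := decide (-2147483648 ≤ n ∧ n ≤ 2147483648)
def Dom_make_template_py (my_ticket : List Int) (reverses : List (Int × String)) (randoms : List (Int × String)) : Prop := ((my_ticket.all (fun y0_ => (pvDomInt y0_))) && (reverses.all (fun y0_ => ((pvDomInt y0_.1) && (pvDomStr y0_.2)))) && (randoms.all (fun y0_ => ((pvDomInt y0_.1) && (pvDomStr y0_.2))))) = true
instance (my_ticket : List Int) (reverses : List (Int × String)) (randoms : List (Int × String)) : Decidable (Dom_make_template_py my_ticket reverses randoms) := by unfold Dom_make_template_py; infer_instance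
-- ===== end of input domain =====

-- B replaces A's single modular-counter string-accumulating loop by a flat list of formatted
-- cells that is then chunked into groups of four and joined (objective: alternative decomposition).
-- Both ports work over List Char (String.ofList at the end) because Lean's String.append is kernel-opaque.

-- ===== PORT A =====
-- shared formatting helpers: both Pythons compute the very same cell string
-- f'{key: >18}' : right-align in width 18, space fill (never truncates)
def pvPad18 (s : List Char) : List Char := List.replicate (18 - s.length) ' ' ++ s

-- '\t{key: >18}: {v}\t' with key = reverses[v] if v in reverses else randoms[i]
-- (dict lookup = first match in the association list; the .getD "" arm is unreachable under Pre_,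
-- which excludes the inputs where Python raises KeyError)
def pvCell (reverses randoms : List (Int × String)) (i v : Int) : List Char :=
  let key := match List.lookup v reverses with
    | some k => k
    | none => (List.lookup i randoms).getD ""
  '\t' :: pvPad18 key.toList ++ [':', ' '] ++ PySem.Int.toChars v ++ ['\t']

def pvSpaces : List Char := List.replicate 127 ' '
def pvDashes : List Char := List.replicate 127 '-'

-- the loop body of A
def pvStepA (reverses randoms : List (Int × String)) (acc : List Char) (p : Int × Int) : List Char :=
  let i := p.1
  let v := p.2
  let acc := if PySem.Int.mod i 4 == 0 then
      (if i == 0 then acc ++ '|' :: pvSpaces ++ ['|', '\n', '|']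
       else acc ++ ['|', '\n', '|'] ++ pvSpaces ++ ['|', '\n', '|'])
    else acc
  acc ++ pvCell reverses randoms i v

def make_template_py (my_ticket : List Int) (reverses : List (Int × String)) (randoms : List (Int × String)) : String :=
  let template := '.' :: pvDashes ++ ['.', '\n']
  let template := (PySem.List.enumerate my_ticket).foldl (pvStepA reverses randoms) template
  String.ofList (template ++ ['|', '\n', '|'] ++ pvSpaces ++ ['|', '\n'] ++ '\'' :: pvDashes ++ ['\''])

-- ===== PORT B =====
def pvSpacer : List Char := '|' :: pvSpaces ++ ['|', '\n']

-- rows(cs): join groups of four cells with the row separator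
def pvRows (cs : List (List Char)) : List Char :=
  if cs.length ≤ 4 then cs.flatten
  else (cs.take 4).flatten ++ ['|', '\n'] ++ pvSpacer ++ ['|'] ++ pvRows (cs.drop 4)
termination_by cs.length
decreasing_by simp; omega

def make_template_py_alt (my_ticket : List Int) (reverses : List (Int × String)) (randoms : List (Int × String)) : String :=
  let cells := (PySem.List.enumerate my_ticket).map (fun p => pvCell reverses randoms p.1 p.2)
  let head := if cells.isEmpty then [] else pvSpacer ++ '|' :: pvRows cells
  String.ofList ('.' :: pvDashes ++ ['.', '\n'] ++ head ++ ['|', '\n'] ++ pvSpacer ++ '\'' :: pvDashes ++ ['\''])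

-- ===== PRECONDITION & SPEC =====
-- Pre_ excludes exactly the tickets on which A raises KeyError: some value is neither a key of
-- reverses nor (by its position) a key of randoms.
def Pre_make_template_py (my_ticket : List Int) (reverses : List (Int × String)) (randoms : List (Int × String)) : Prop :=
  ∀ p ∈ PySem.List.enumerate my_ticket, (List.lookup p.2 reverses).isSome ∨ (List.lookup p.1 randoms).isSome
instance (my_ticket : List Int) (reverses : List (Int × String)) (randoms : List (Int × String)) : Decidable (Pre_make_template_py my_ticket reverses randoms) := by unfold Pre_make_template_py; infer_instance

def pvWitness_make_template_py : List Int × (List (Int × String)) × (List (Int × String)) :=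
  ([7, 3], [((7 : Int), "class")], [((1 : Int), "field 1")])

def Spec_make_template_py (my_ticket : List Int) (reverses : List (Int × String)) (randoms : List (Int × String)) (out : String) : Prop := out = make_template_py_alt my_ticket reverses randoms
instance (my_ticket : List Int) (reverses : List (Int × String)) (randoms : List (Int × String)) (out : String) : Decidable (Spec_make_template_py my_ticket reverses randoms out) := by unfold Spec_make_template_py; infer_instance

-- ===== CLAIM (what is proved, stated in full; the proofs are below) =====
def Claim_equal_make_template_py : Prop := ∀ (my_ticket : List Int) (reverses : List (Int × String)) (randoms : List (Int × String)), Dom_make_template_py my_ticket reverses randoms → Pre_make_template_py my_ticket reverses randoms → Spec_make_template_py my_ticket reverses randoms (make_template_py my_ticket reverses randoms)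

-- ===== LEMMAS AND PROOFS =====
-- first-group prefix (k = 0) vs later-group separator, as A's loop emits it
def pvPre (k : Int) : List Char := if k = 0 then pvSpacer ++ ['|'] else ['|', '\n'] ++ pvSpacer ++ ['|']

theorem pvStepA_head (reverses randoms : List (Int × String)) (acc : List Char) (k v : Int)
    (h : PySem.Int.mod k 4 = 0) :
    pvStepA reverses randoms acc (k, v) = acc ++ pvPre k ++ pvCell reverses randoms k v := by
  have hd : (4 : Int) ∣ k := by rwa [← PySem.Int.mod_eq_zero_iff_dvd]
  by_cases hk : k = 0 <;>
    simp [pvStepA, pvPre, hk, hd, pvSpacer, List.append_assoc]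

theorem pvStepA_mid (reverses randoms : List (Int × String)) (acc : List Char) (k v : Int)
    (h : PySem.Int.mod k 4 ≠ 0) :
    pvStepA reverses randoms acc (k, v) = acc ++ pvCell reverses randoms k v := by
  have hd : ¬ (4 : Int) ∣ k := by rwa [← PySem.Int.mod_eq_zero_iff_dvd]
  simp [pvStepA, hd]

theorem pvLoop_eq (reverses randoms : List (Int × String)) (xs : List Int) (k : Int)
    (acc : List Char) (hk : 0 ≤ k) (hm : PySem.Int.mod k 4 = 0) :
    (PySem.List.enumerate xs k).foldl (pvStepA reverses randoms) acc =
      (if xs = [] then acc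
       else acc ++ pvPre k ++
         pvRows ((PySem.List.enumerate xs k).map (fun p => pvCell reverses randoms p.1 p.2))) := by
  have h4 : ∀ x : Int, PySem.Int.mod x 4 = x % 4 := fun x =>
    PySem.Int.mod_eq_emod_of_pos (by norm_num)
  have hm' : k % 4 = 0 := by rw [← h4]; exact hm
  have h1 : PySem.Int.mod (k + 1) 4 ≠ 0 := by rw [h4]; omega
  have h2 : PySem.Int.mod (k + 1 + 1) 4 ≠ 0 := by rw [h4]; omega
  have h3 : PySem.Int.mod (k + 1 + 1 + 1) 4 ≠ 0 := by rw [h4]; omega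
  match xs with
  | [] => simp [PySem.List.enumerate]
  | [a] =>
      simp only [PySem.List.enumerate_cons, PySem.List.enumerate_nil, List.foldl, List.map,
        pvStepA_head _ _ _ _ _ hm]
      simp [pvRows]
  | [a, b] =>
      simp only [PySem.List.enumerate_cons, PySem.List.enumerate_nil, List.foldl, List.map,
        pvStepA_head _ _ _ _ _ hm, pvStepA_mid _ _ _ _ _ h1]
      simp [pvRows, List.append_assoc]
  | [a, b, c] =>
      simp only [PySem.List.enumerate_cons, PySem.List.enumerate_nil, List.foldl, List.map,
        pvStepA_head _ _ _ _ _ hm, pvStepA_mid _ _ _ _ _ h1, pvStepA_mid _ _ _ _ _ h2]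
      simp [pvRows, List.append_assoc]
  | [a, b, c, d] =>
      simp only [PySem.List.enumerate_cons, PySem.List.enumerate_nil, List.foldl, List.map,
        pvStepA_head _ _ _ _ _ hm, pvStepA_mid _ _ _ _ _ h1, pvStepA_mid _ _ _ _ _ h2,
        pvStepA_mid _ _ _ _ _ h3]
      simp [pvRows, List.append_assoc]
  | a :: b :: c :: d :: e :: rest =>
      have ih := pvLoop_eq reverses randoms (e :: rest) (k + 4)
        (acc ++ pvPre k ++ pvCell reverses randoms k a ++ pvCell reverses randoms (k + 1) b ++
          pvCell reverses randoms (k + 1 + 1) c ++ pvCell reverses randoms (k + 1 + 1 + 1) d)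
        (by omega) (by rw [h4]; omega)
      simp only [PySem.List.enumerate_cons, List.foldl, List.map,
        pvStepA_head _ _ _ _ _ hm, pvStepA_mid _ _ _ _ _ h1, pvStepA_mid _ _ _ _ _ h2,
        pvStepA_mid _ _ _ _ _ h3, List.append_assoc,
        show k + 1 + 1 + 1 + 1 = k + 4 from by omega] at ih ⊢
      rw [ih]
      have hpre : pvPre (k + 4) = ['|', '\n'] ++ pvSpacer ++ ['|'] := by
        unfold pvPre; rw [if_neg (by omega)]
      have hlen : ¬ (pvCell reverses randoms k a ::
          pvCell reverses randoms (k + 1) b ::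
          pvCell reverses randoms (k + 1 + 1) c ::
          pvCell reverses randoms (k + 1 + 1 + 1) d ::
          pvCell reverses randoms (k + 4) e ::
            List.map (fun p => pvCell reverses randoms p.1 p.2)
              (PySem.List.enumerate rest (k + 4 + 1))).length ≤ 4 := by
        simp
      conv_rhs => rw [pvRows]
      rw [if_neg hlen]
      simp [hpre, List.append_assoc]
termination_by xs.length

theorem make_template_py_spec : Claim_equal_make_template_py := by
  intro my_ticket reverses randoms _ _
  unfold Spec_make_template_py make_template_py make_template_py_alt
  dsimp only
  rw [pvLoop_eq reverses randoms my_ticket 0 _ le_rfl (by decide)]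
  cases my_ticket with
  | nil => simp [PySem.List.enumerate, pvSpacer]
  | cons x xs =>
      simp [PySem.List.enumerate_cons, pvPre, List.isEmpty, pvSpacer]
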